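-- pv_equiv track=rewrite | github.com/woonmong712/python_study | codeup/p2001~3000/p2651.py | how_to_seat
-- ===== SOURCE A (Python) =====
-- def how_to_seat(seat_status, people, count, start_index):
--
--     if cal_seat_status(seat_status) == people:
--         count += 1
--         return count
--
--     for i in range(start_index, len(seat_status)):
--         if not seat_status[i]:
--             seat_status[i] = True
--
--             count = how_to_seat(seat_status, people, count, i + 1)
--
--             seat_status[i] = False
--
--     return count
--
-- def cal_seat_status(seat_status):
--     return sum(seat_status)
-- ===== SOURCE B (Python) =====
-- def how_to_seat(seat_status, people, count, start_index):
--     remaining = people - sum(seat_status)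
--     if remaining < 0:
--         return count
--     free = seat_status[start_index:].count(False)
--     if remaining > free:
--         return count
--     r = 1
--     for i in range(remaining):
--         r = r * (free - i) // (i + 1)
--     return count + r
-- ===== Notes on version B (the rewrite author's own statement) =====
-- stated objective: faster
-- what changed: Replaces A's exponential backtracking recursion (try every free seat, recurse, undo) by a closed-form binomial coefficient C(free, remaining) computed with an iterative multiplicative loop; B does not mutate seat_status.
-- outside the precondition, e.g. on how_to_seat([False], 1, 0, -1): A returns 2, B returns 1
import Mathlib
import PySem

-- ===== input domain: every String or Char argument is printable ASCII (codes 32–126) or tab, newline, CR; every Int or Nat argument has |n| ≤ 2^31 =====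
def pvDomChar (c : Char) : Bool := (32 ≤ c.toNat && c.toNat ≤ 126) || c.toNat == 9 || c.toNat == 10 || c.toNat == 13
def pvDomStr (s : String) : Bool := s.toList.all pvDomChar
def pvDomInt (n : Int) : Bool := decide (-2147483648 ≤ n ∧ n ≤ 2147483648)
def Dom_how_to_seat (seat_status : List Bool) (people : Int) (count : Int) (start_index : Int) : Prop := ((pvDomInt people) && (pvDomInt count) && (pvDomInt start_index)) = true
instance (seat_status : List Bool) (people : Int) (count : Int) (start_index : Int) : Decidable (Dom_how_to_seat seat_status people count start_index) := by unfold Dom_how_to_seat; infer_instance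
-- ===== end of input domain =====

-- B replaces A's exponential backtracking recursion by the closed-form binomial
-- coefficient C(free, remaining) computed with an iterative multiplicative loop (faster).
-- A temporarily mutates seat_status but restores it before returning, so only the
-- return value is observable; B does not touch it.

-- ===== PORT A =====
-- sum(seat_status)
def cal_seat_status (seat_status : List Bool) : Int :=
  seat_status.foldl (fun a b => a + if b then 1 else 0) 0

-- termination helper for the backtracking recursion: setting a free seat True
-- strictly decreases the number of free seats (cited by name in decreasing_by)
theorem countP_set_false_true (xs : List Bool) (i : Int)
    (h : PySem.List.pyGet? xs i = some false) :
    (PySem.List.pySetD xs i true).countP (fun b => !b) + 1 = xs.countP (fun b => !b) := by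
  have aux : ∀ (l : List Bool) (k : Nat), l[k]? = some false →
      (l.set k true).countP (fun b => !b) + 1 = l.countP (fun b => !b) := by
    intro l
    induction l with
    | nil => intro k hx; simp at hx
    | cons a t ih =>
      intro k hx
      cases k with
      | zero =>
        simp only [List.getElem?_cons_zero, Option.some.injEq] at hx
        simp [List.set, List.countP_cons, hx]
      | succ k =>
        have hx' : t[k]? = some false := by simpa using hx
        have := ih k hx'
        simp only [List.set, List.countP_cons]
        omega
  unfold PySem.List.pyGet? at h
  unfold PySem.List.pySetD PySem.List.pySet? PySem.List.pyIdx? at *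
  by_cases h0 : 0 ≤ i
  · by_cases h1 : i < (xs.length : Int)
    · simp [h0, h1] at h ⊢
      have hb : i.toNat < xs.length := by omega
      simpa using aux xs i.toNat (by rw [List.getElem?_eq_getElem hb, h])
    · simp [h0, h1] at h
  · by_cases h2 : -(xs.length : Int) ≤ i
    · simp [h0, h2] at h ⊢
      simpa using aux xs (xs.length - (-i).toNat) h
    · simp [h0, h2] at h

theorem countP_pySetD_lt (xs : List Bool) (i : Int)
    (h : PySem.List.pyGet? xs i = some false) :
    (PySem.List.pySetD xs i true).countP (fun b => !b) < xs.countP (fun b => !b) := by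
  have := countP_set_false_true xs i h; omega

mutual
  def how_to_seat (seat_status : List Bool) (people : Int) (count : Int) (start_index : Int) : Int :=
    if cal_seat_status seat_status = people then count + 1
    else howToSeatLoop seat_status people count
      (PySem.List.pyRange start_index (seat_status.length : Int) 1)
  termination_by (seat_status.countP (fun b => !b), 1, 0)
  decreasing_by exact Prod.Lex.right _ (Prod.Lex.left _ _ (by omega))

  def howToSeatLoop (seat_status : List Bool) (people : Int) (count : Int) (is : List Int) : Int :=
    match is with
    | [] => count
    | i :: rest =>
      match h : PySem.List.pyGet? seat_status i with
      | some true => howToSeatLoop seat_status people count rest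
      | some false =>
          howToSeatLoop seat_status people
            (how_to_seat (PySem.List.pySetD seat_status i true) people count (i + 1)) rest
      | none => count   -- IndexError in Python; excluded by Pre_
  termination_by (seat_status.countP (fun b => !b), 0, is.length)
  decreasing_by
    · exact Prod.Lex.right _ (Prod.Lex.right _ (by simp))
    · exact Prod.Lex.left _ _ (countP_pySetD_lt _ _ h)
    · exact Prod.Lex.right _ (Prod.Lex.right _ (by simp))
end

-- ===== PORT B =====
def how_to_seat_alt (seat_status : List Bool) (people : Int) (count : Int) (start_index : Int) : Int :=
  let remaining := people - (seat_status.countP (fun b => b) : Int)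
  if remaining < 0 then count
  else
    let free : Int := ((PySem.List.slice seat_status (some start_index) none).count false : Int)
    if remaining > free then count
    else count + (PySem.List.pyRange 0 remaining 1).foldl
        (fun r i => PySem.Int.floordiv (r * (free - i)) (i + 1)) 1

-- ===== PRECONDITION & SPEC =====
-- Pre_ excludes negative start_index on the inputs where it matters: below -len A raises
-- IndexError (unless the seats are already exactly filled), and in [-len, 0) with people
-- still to seat A revisits seats through Python negative-index wraparound, which B does
-- not reproduce; the already-filled and overfull cases stay inside Pre_ for any in-range
-- start_index.
def Pre_how_to_seat (seat_status : List Bool) (people : Int) (count : Int) (start_index : Int) : Prop :=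
  0 ≤ start_index ∨ (seat_status.countP (fun b => b) : Int) = people ∨
    (-(seat_status.length : Int) ≤ start_index ∧ people < (seat_status.countP (fun b => b) : Int))
instance (seat_status : List Bool) (people : Int) (count : Int) (start_index : Int) : Decidable (Pre_how_to_seat seat_status people count start_index) := by unfold Pre_how_to_seat; infer_instance

def pvWitness_how_to_seat : List Bool × Int × Int × Int := ([false, true, false], 2, 0, 0)

def Spec_how_to_seat (seat_status : List Bool) (people : Int) (count : Int) (start_index : Int) (out : Int) : Prop := out = how_to_seat_alt seat_status people count start_index
instance (seat_status : List Bool) (people : Int) (count : Int) (start_index : Int) (out : Int) : Decidable (Spec_how_to_seat seat_status people count start_index out) := by unfold Spec_how_to_seat; infer_instance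

-- ===== CLAIM (what is proved, stated in full; the proofs are below) =====
def Claim_equal_how_to_seat : Prop := ∀ (seat_status : List Bool) (people : Int) (count : Int) (start_index : Int), Dom_how_to_seat seat_status people count start_index → Pre_how_to_seat seat_status people count start_index → Spec_how_to_seat seat_status people count start_index (how_to_seat seat_status people count start_index)

-- ===== LEMMAS AND PROOFS =====

-- the common value: count + V, where V = C(free seats from start, people - seated) or 0
def pvV (seat_status : List Bool) (people : Int) (start_index : Int) : Int :=
  if people - (seat_status.countP (fun b => b) : Int) < 0 then 0
  else (((seat_status.drop start_index.toNat).countP (fun b => !b)).choose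
          (people - (seat_status.countP (fun b => b) : Int)).toNat : Int)

-- per-branch contribution and partial sums of the backtracking loop
def pvW (r : Int) (m : Nat) : Int := if r - 1 < 0 then 0 else (m.choose (r - 1).toNat : Int)
def pvS (r : Int) (n : Nat) : Int := ∑ m ∈ Finset.range n, pvW r m

theorem pv_hockey (n k : Nat) : (∑ m ∈ Finset.range n, m.choose k) = n.choose (k + 1) := by
  induction n with
  | zero => simp
  | succ n ih => rw [Finset.sum_range_succ, ih, Nat.choose_succ_succ]; simp [Nat.succ_eq_add_one]; omega

theorem pv_cal_eq (l : List Bool) : cal_seat_status l = (l.countP (fun b => b) : Int) := by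
  have aux : ∀ (l : List Bool) (a : Int),
      l.foldl (fun a b => a + if b then 1 else 0) a = a + (l.countP (fun b => b) : Int) := by
    intro l
    induction l with
    | nil => intro a; simp
    | cons x t ih =>
      intro a
      simp only [List.foldl_cons, List.countP_cons, ih]
      cases x <;> simp <;> push_cast <;> ring
  simpa using aux l 0

theorem pv_count_false (l : List Bool) : l.count false = l.countP (fun b => !b) := by
  induction l with
  | nil => rfl
  | cons a t ih => cases a <;> simp [List.count_cons, List.countP_cons, ih]

theorem pv_bloop (f : Nat) (m : Nat) (hm : m ≤ f) :
    (PySem.List.pyRange 0 (m : Int) 1).foldl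
      (fun r i => PySem.Int.floordiv (r * ((f : Int) - i)) (i + 1)) 1 = (f.choose m : Int) := by
  induction m with
  | zero =>
    rw [show ((0 : Nat) : Int) = 0 by norm_num, PySem.List.pyRange_one_eq_nil (by norm_num)]
    simp
  | succ m ih =>
    rw [show ((m + 1 : Nat) : Int) = (m : Int) + 1 by push_cast; ring,
      PySem.List.pyRange_one_succ_right (by positivity), List.foldl_append, ih (by omega)]
    simp only [List.foldl_cons, List.foldl_nil]
    have hfm : ((f : Int) - (m : Int)) = ((f - m : Nat) : Int) := by omega
    have hh : f.choose m * (f - m) = f.choose (m + 1) * (m + 1) :=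
      (Nat.choose_succ_right_eq f m).symm
    have hprod : (f.choose m : Int) * ((f - m : Nat) : Int)
        = ((f.choose (m + 1) * (m + 1) : Nat) : Int) := by
      rw [← hh]; push_cast; ring
    rw [hfm, hprod, show ((m : Int) + 1) = ((m + 1 : Nat) : Int) by push_cast; ring,
      PySem.Int.floordiv_natCast, Nat.mul_div_cancel _ (by omega)]

theorem pv_B_eq (seat_status : List Bool) (people count start_index : Int) (h : 0 ≤ start_index) :
    how_to_seat_alt seat_status people count start_index = count + pvV seat_status people start_index := by
  have hslice : PySem.List.slice seat_status (some start_index) none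
      = seat_status.drop start_index.toNat := PySem.List.slice_from seat_status h
  set f : Nat := (seat_status.drop start_index.toNat).countP (fun b => !b) with hf
  have hcnt : (PySem.List.slice seat_status (some start_index) none).count false = f := by
    rw [hslice, pv_count_false]
  set r : Int := people - (seat_status.countP (fun b => b) : Int) with hr
  by_cases h1 : r < 0
  · simp [how_to_seat_alt, pvV, ← hr, h1]
  · by_cases h2 : r > (f : Int)
    · have hz : f.choose r.toNat = 0 := Nat.choose_eq_zero_of_lt (by omega)
      simp [how_to_seat_alt, pvV, ← hr, h1, h2, hcnt]
      exact hz
    · have hb := pv_bloop f r.toNat (by omega)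
      have hrr : ((r.toNat : Nat) : Int) = r := by omega
      rw [hrr] at hb
      simp [how_to_seat_alt, pvV, ← hr, h1, h2, hcnt, hb]
      rw [← hf]

theorem pv_B_zero (l : List Bool) (people count start : Int)
    (h : (l.countP (fun b => b) : Int) = people) :
    how_to_seat_alt l people count start = count + 1 := by
  simp only [how_to_seat_alt]
  rw [show people - (l.countP (fun b => b) : Int) = 0 by omega]
  have hfree : (0:Int) ≤ ((PySem.List.slice l (some start) none).count false : Int) := by positivity
  rw [if_neg (by omega), if_neg (by omega), PySem.List.pyRange_one_eq_nil (by omega)]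
  simp

theorem pvS_succ (r : Int) (n : Nat) : pvS r (n + 1) = pvS r n + pvW r n :=
  Finset.sum_range_succ _ _

theorem pv_countT_set (l : List Bool) (k : Nat) (hx : l[k]? = some false) :
    (l.set k true).countP (fun b => b) = l.countP (fun b => b) + 1 := by
  induction l generalizing k with
  | nil => simp at hx
  | cons a t ih =>
    cases k with
    | zero =>
      simp only [List.getElem?_cons_zero, Option.some.injEq] at hx
      simp [List.set, List.countP_cons, hx]
    | succ k =>
      have hx' : t[k]? = some false := by simpa using hx
      simp only [List.set, List.countP_cons, ih k hx']
      omega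

theorem pv_drop_set (l : List Bool) (k : Nat) (v : Bool) :
    (l.set k v).drop (k + 1) = l.drop (k + 1) := by
  induction l generalizing k with
  | nil => simp
  | cons a t ih =>
    cases k with
    | zero => simp [List.set]
    | succ k => simp only [List.set, List.drop_succ_cons]; exact ih k

theorem pvV_eq_S (seats : List Bool) (people start : Int)
    (hne : people - (seats.countP (fun b => b) : Int) ≠ 0) :
    pvV seats people start
      = pvS (people - (seats.countP (fun b => b) : Int))
            ((seats.drop start.toNat).countP (fun b => !b)) := by
  set r : Int := people - (seats.countP (fun b => b) : Int) with hrdef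
  set f : Nat := (seats.drop start.toNat).countP (fun b => !b) with hfdef
  by_cases hneg : r < 0
  · have hz : pvS r f = 0 := by
      simp [pvS, pvW, show r - 1 < 0 by omega]
    simp [pvV, ← hrdef, hneg, hz]
  · have hpos : ¬ r - 1 < 0 := by omega
    have h1 : pvS r f = ((∑ m ∈ Finset.range f, m.choose (r - 1).toNat : Nat) : Int) := by
      simp [pvS, pvW, hpos]
    rw [h1, pv_hockey]
    have h2 : (r - 1).toNat + 1 = r.toNat := by omega
    rw [h2]
    simp [pvV, ← hrdef, ← hfdef, hneg]

theorem pv_count_split (l : List Bool) : l.countP (fun b => b) + l.countP (fun b => !b) = l.length := by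
  induction l with
  | nil => rfl
  | cons a t ih => cases a <;> simp [List.countP_cons] <;> omega

-- A with more people seated than wanted: the base case never fires and no branch adds
theorem pv_A_neg (seat_status : List Bool) (people count start_index : Int)
    (h : people < (seat_status.countP (fun b => b) : Int)) :
    how_to_seat seat_status people count start_index = count := by
  suffices H : ∀ (n : Nat) (seats : List Bool), seats.countP (fun b => !b) = n →
      ∀ (people count start : Int), people < (seats.countP (fun b => b) : Int) →
      how_to_seat seats people count start = count from
    H _ seat_status rfl people count start_index h
  intro n
  induction n using Nat.strong_induction_on with
  | _ n IH =>
  intro seats hn people count start hlt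
  have hloop : ∀ (is : List Int) (count : Int),
      howToSeatLoop seats people count is = count := by
    intro is
    induction is with
    | nil => intro count; rw [howToSeatLoop]
    | cons i rest ih =>
      intro count
      rw [howToSeatLoop]
      cases hg : PySem.List.pyGet? seats i with
      | none => rfl
      | some b =>
        cases b with
        | true => exact ih count
        | false =>
          have hcf := countP_set_false_true seats i hg
          have hlen : (PySem.List.pySetD seats i true).length = seats.length :=
            PySem.List.length_pySetD seats i true
          have hs1 := pv_count_split (PySem.List.pySetD seats i true)
          have hs2 := pv_count_split seats
          have hrec := IH ((PySem.List.pySetD seats i true).countP (fun b => !b)) (by omega)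
            (PySem.List.pySetD seats i true) rfl people count (i + 1) (by omega)
          rw [hrec]
          exact ih count
  rw [how_to_seat, if_neg (by rw [pv_cal_eq]; omega)]
  exact hloop _ count

theorem pv_A_eq (seat_status : List Bool) (people count start_index : Int) (h : 0 ≤ start_index) :
    how_to_seat seat_status people count start_index = count + pvV seat_status people start_index := by
  suffices H : ∀ (n : Nat) (seats : List Bool), seats.countP (fun b => !b) = n →
      ∀ (people count start : Int), 0 ≤ start →
      how_to_seat seats people count start = count + pvV seats people start from
    H _ seat_status rfl people count start_index h
  intro n
  induction n using Nat.strong_induction_on with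
  | _ n IH =>
  intro seats hn people count start hstart
  by_cases hbase : cal_seat_status seats = people
  · rw [how_to_seat, if_pos hbase]
    have hr0 : people - (seats.countP (fun b => b) : Int) = 0 := by
      rw [pv_cal_eq] at hbase; omega
    simp [pvV, hr0]
  · set r : Int := people - (seats.countP (fun b => b) : Int) with hrdef
    have hrne : r ≠ 0 := by rw [pv_cal_eq] at hbase; omega
    have hloop : ∀ (d : Nat) (i count : Int), 0 ≤ i → (seats.length : Int) ≤ i + d →
        howToSeatLoop seats people count (PySem.List.pyRange i (seats.length : Int) 1)
          = count + pvS r ((seats.drop i.toNat).countP (fun b => !b)) := by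
      intro d
      induction d with
      | zero =>
        intro i count h0 h1
        rw [PySem.List.pyRange_one_eq_nil (by omega), howToSeatLoop]
        have hd : seats.drop i.toNat = [] := List.drop_eq_nil_of_le (by omega)
        simp [hd, pvS]
      | succ d ihd =>
        intro i count h0 h1
        by_cases hlt : i < (seats.length : Int)
        · have hj : i.toNat < seats.length := by omega
          have hget : PySem.List.pyGet? seats i = some seats[i.toNat] :=
            PySem.List.pyGet?_eq_some_getElem seats h0 hlt
          have hdrop : seats.drop i.toNat = seats[i.toNat] :: seats.drop (i.toNat + 1) :=
            List.drop_eq_getElem_cons hj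
          have hone : (i + 1).toNat = i.toNat + 1 := by omega
          rw [PySem.List.pyRange_one_cons hlt, howToSeatLoop, hget]
          cases hx : seats[i.toNat] with
          | true =>
            simp only []
            rw [ihd (i + 1) count (by omega) (by omega), hone]
            rw [hdrop, hx]
            simp [List.countP_cons]
          | false =>
            simp only []
            have hgetf : PySem.List.pyGet? seats i = some false := by rw [hget, hx]
            have hset : PySem.List.pySetD seats i true = seats.set i.toNat true :=
              PySem.List.pySetD_of_nonneg seats true h0
            have hcf : (seats.set i.toNat true).countP (fun b => !b) + 1
                = seats.countP (fun b => !b) := by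
              have h5 := countP_set_false_true seats i hgetf
              rwa [hset] at h5
            have hIH := IH ((seats.set i.toNat true).countP (fun b => !b)) (by omega)
              (seats.set i.toNat true) rfl people count (i + 1) (by omega)
            have hgetq : seats[i.toNat]? = some false := by
              rw [List.getElem?_eq_getElem hj, hx]
            have hT : (seats.set i.toNat true).countP (fun b => b)
                = seats.countP (fun b => b) + 1 := pv_countT_set seats i.toNat hgetq
            have hD : (seats.set i.toNat true).drop (i.toNat + 1)
                = seats.drop (i.toNat + 1) := pv_drop_set seats i.toNat true
            have hVset : pvV (seats.set i.toNat true) people (i + 1)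
                = pvW r ((seats.drop (i.toNat + 1)).countP (fun b => !b)) := by
              simp only [pvV, pvW, hT, hone, hD, ← hrdef]
              have h6 : people - ((seats.countP (fun b => b) : Int) + 1) = r - 1 := by omega
              rw [show ((seats.countP (fun b => b) + 1 : Nat) : Int)
                  = (seats.countP (fun b => b) : Int) + 1 by push_cast; ring, h6]
            rw [hset, hIH, hVset]
            rw [ihd (i + 1) _ (by omega) (by omega), hone]
            rw [hdrop, hx]
            simp only [List.countP_cons]
            rw [show (seats.drop (i.toNat + 1)).countP (fun b => !b)
                + (if (fun b => !b) false = true then 1 else 0)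
                = (seats.drop (i.toNat + 1)).countP (fun b => !b) + 1 by simp]
            rw [pvS_succ]
            ring
        · rw [PySem.List.pyRange_one_eq_nil (by omega), howToSeatLoop]
          have hd : seats.drop i.toNat = [] := List.drop_eq_nil_of_le (by omega)
          simp [hd, pvS]
    rw [how_to_seat, if_neg hbase,
      hloop seats.length start count hstart (by omega),
      pvV_eq_S seats people start (by rw [← hrdef]; exact hrne)]

-- ===== VERDICT (by name: the statement is the Claim_ definition above) =====
theorem how_to_seat_spec : Claim_equal_how_to_seat := by
  intro seats people count start _ hpre
  unfold Spec_how_to_seat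
  by_cases h0 : 0 ≤ start
  · rw [pv_A_eq seats people count start h0, pv_B_eq seats people count start h0]
  · rcases hpre with h | h | h
    · exact absurd h h0
    · have hbase : cal_seat_status seats = people := by rw [pv_cal_eq]; omega
      rw [how_to_seat, if_pos hbase, pv_B_zero seats people count start h]
    · rw [pv_A_neg seats people count start h.2]
      simp only [how_to_seat_alt]
      rw [if_pos (by omega)]
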